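-- pv_equiv track=rewrite | github.com/misc-de/Yaga | yaga/camera.py | _auto_manual_values
-- ===== SOURCE A (Python) =====
-- def _auto_manual_values(menu: dict[int, str]) -> tuple[int | None, int | None]:
--     """For a v4l2 exposure-style menu, pick the (manual, auto) values.
--     'Manual' is the obvious one; 'auto' falls back through "Auto Mode",
--     "Aperture Priority Mode", then anything else."""
--     manual: int | None = None
--     auto: int | None = None
--     for v, label in menu.items():
--         if "manual" in label.lower():
--             manual = v
--             break
--     for v, label in menu.items():
--         if v == manual:
--             continue
--         if "auto" in label.lower():
--             auto = v
--             break
--     if auto is None: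
--         for v, label in menu.items():
--             if v == manual:
--                 continue
--             if "aperture" in label.lower():
--                 auto = v
--                 break
--     if auto is None:
--         for v in menu:
--             if v != manual:
--                 auto = v
--                 break
--     return manual, auto
-- ===== SOURCE B (Python) =====
-- def _auto_manual_values(menu: dict[int, str]) -> tuple[int | None, int | None]:
--     """Pick (manual, auto) values from a v4l2-style menu: one bucketing pass
--     replaces the three cascading early-break scans."""
--     manual = next((v for v, label in menu.items() if "manual" in label.lower()), None)
--     first_auto = first_aperture = first_any = None
--     for v, label in menu.items():
--         if v == manual:
--             continue
--         low = label.lower()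
--         if first_auto is None and "auto" in low:
--             first_auto = v
--         if first_aperture is None and "aperture" in low:
--             first_aperture = v
--         if first_any is None:
--             first_any = v
--     auto = first_auto if first_auto is not None else (
--         first_aperture if first_aperture is not None else first_any)
--     return manual, auto
-- ===== Notes on version B (the rewrite author's own statement) =====
-- stated objective: simpler
-- what changed: A's three cascading early-break scans for the auto value are replaced by one bucketing pass that records the first 'auto', first 'aperture' and first non-manual entry, plus a next()-comprehension for manual; the fallback is then a single chained selection.
import Mathlib
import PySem

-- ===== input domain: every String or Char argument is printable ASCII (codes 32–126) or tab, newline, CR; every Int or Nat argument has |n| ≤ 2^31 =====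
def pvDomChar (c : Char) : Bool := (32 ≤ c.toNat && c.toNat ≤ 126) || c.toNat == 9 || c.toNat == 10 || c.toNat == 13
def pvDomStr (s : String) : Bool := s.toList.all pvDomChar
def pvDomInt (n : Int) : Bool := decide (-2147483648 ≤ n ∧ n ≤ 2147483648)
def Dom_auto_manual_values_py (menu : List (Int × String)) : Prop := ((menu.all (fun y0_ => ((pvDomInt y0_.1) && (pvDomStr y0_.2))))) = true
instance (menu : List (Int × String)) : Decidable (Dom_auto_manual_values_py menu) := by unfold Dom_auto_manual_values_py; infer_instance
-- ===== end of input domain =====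

-- B replaces A's three cascading early-break scans for 'auto' by ONE bucketing pass
-- (first 'auto', first 'aperture', first non-manual); same return value (simpler decomposition).

-- ===== PORT A =====
-- first loop: first v whose lowered label contains "manual" (break)
def pvAScanManual : List (Int × String) → Option Int
  | [] => none
  | (v, label) :: rest =>
    if PySem.Str.isIn "manual" (PySem.Str.lower label) then some v else pvAScanManual rest

-- second loop: skip v == manual, break on first label containing "auto"
def pvAScanAuto (manual : Option Int) : List (Int × String) → Option Int
  | [] => none
  | (v, label) :: rest =>
    if some v == manual then pvAScanAuto manual rest
    else if PySem.Str.isIn "auto" (PySem.Str.lower label) then some v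
    else pvAScanAuto manual rest

-- third loop: skip v == manual, break on first label containing "aperture"
def pvAScanAperture (manual : Option Int) : List (Int × String) → Option Int
  | [] => none
  | (v, label) :: rest =>
    if some v == manual then pvAScanAperture manual rest
    else if PySem.Str.isIn "aperture" (PySem.Str.lower label) then some v
    else pvAScanAperture manual rest

-- fourth loop: first key v with v != manual
def pvAScanAny (manual : Option Int) : List (Int × String) → Option Int
  | [] => none
  | (v, _) :: rest =>
    if some v != manual then some v else pvAScanAny manual rest

def auto_manual_values_py (menu : List (Int × String)) : Option Int × Option Int :=
  let manual := pvAScanManual menu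
  let auto := pvAScanAuto manual menu
  let auto := if auto = none then pvAScanAperture manual menu else auto
  let auto := if auto = none then pvAScanAny manual menu else auto
  (manual, auto)

-- ===== PORT B =====
-- one bucketing step: (first_auto, first_aperture, first_any)
def pvBStep (manual : Option Int) (st : Option Int × Option Int × Option Int)
    (p : Int × String) : Option Int × Option Int × Option Int :=
  if some p.1 == manual then st
  else
    let low := PySem.Str.lower p.2
    ((if st.1 == none && PySem.Str.isIn "auto" low then some p.1 else st.1),
     (if st.2.1 == none && PySem.Str.isIn "aperture" low then some p.1 else st.2.1),
     (if st.2.2 == none then some p.1 else st.2.2))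

def auto_manual_values_py_alt (menu : List (Int × String)) : Option Int × Option Int :=
  let manual := (menu.find? (fun p => PySem.Str.isIn "manual" (PySem.Str.lower p.2))).map Prod.fst
  let st := menu.foldl (pvBStep manual) (none, none, none)
  (manual, st.1.orElse fun _ => st.2.1.orElse fun _ => st.2.2)

-- ===== PRECONDITION & SPEC =====
def Spec_auto_manual_values_py (menu : List (Int × String)) (out : Option Int × Option Int) : Prop := out = auto_manual_values_py_alt menu
instance (menu : List (Int × String)) (out : Option Int × Option Int) : Decidable (Spec_auto_manual_values_py menu out) := by unfold Spec_auto_manual_values_py; infer_instance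

-- ===== CLAIM (what is proved, stated in full; the proofs are below) =====
def Claim_equal_auto_manual_values_py : Prop := ∀ (menu : List (Int × String)), Dom_auto_manual_values_py menu → Spec_auto_manual_values_py menu (auto_manual_values_py menu)

-- ===== LEMMAS AND PROOFS =====

theorem pvManual_eq (menu : List (Int × String)) :
    pvAScanManual menu
      = (menu.find? (fun p => PySem.Str.isIn "manual" (PySem.Str.lower p.2))).map Prod.fst := by
  induction menu with
  | nil => rfl
  | cons p rest ih =>
    obtain ⟨v, label⟩ := p
    cases hc : PySem.Chars.isIn ['m','a','n','u','a','l'] (PySem.Chars.lower label.toList) <;>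
      simp [pvAScanManual, List.find?, hc, ih]

-- the fold computes the three "first match" scans, modulo already-filled buckets
theorem pvFold_eq (m : Option Int) (menu : List (Int × String))
    (a b c : Option Int) :
    menu.foldl (pvBStep m) (a, b, c)
      = ((a.orElse fun _ => pvAScanAuto m menu),
         (b.orElse fun _ => pvAScanAperture m menu),
         (c.orElse fun _ => pvAScanAny m menu)) := by
  induction menu generalizing a b c with
  | nil => cases a <;> cases b <;> cases c <;> rfl
  | cons p rest ih =>
    obtain ⟨v, label⟩ := p
    simp only [List.foldl_cons, pvBStep, pvAScanAuto, pvAScanAperture, pvAScanAny]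
    by_cases hm : (some v == m) = true
    · simp [ih, eq_of_beq hm]
    · simp only [hm, Bool.false_eq_true, if_false, bne, Bool.not_false, if_true, ih]
      cases a <;> cases b <;> cases c <;>
        simp [Option.orElse] <;> split_ifs <;> simp_all [Option.orElse]

theorem auto_manual_values_py_spec' (menu : List (Int × String)) :
    auto_manual_values_py menu = auto_manual_values_py_alt menu := by
  simp only [auto_manual_values_py, auto_manual_values_py_alt, ← pvManual_eq, pvFold_eq]
  cases h1 : pvAScanAuto (pvAScanManual menu) menu <;>
    cases h2 : pvAScanAperture (pvAScanManual menu) menu <;>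
      simp [Option.orElse]

-- ===== VERDICT (by name: the statement is the Claim_ definition above) =====
theorem auto_manual_values_py_spec : Claim_equal_auto_manual_values_py := by
  intro menu _
  exact auto_manual_values_py_spec' menu
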